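-- pv_equiv track=rewrite | github.com/LucasThePatator/adventofcode2024 | 15.py | can_move_1
-- ===== SOURCE A (Python) =====
-- def can_move_1(board, row, col, direction, preceding):
--     if direction == '^':
--         new_row, new_col = row-1, col
--     elif direction == '>':
--         new_row, new_col = row, col + 1
--     elif direction == 'v':
--         new_row, new_col = row+1, col
--     elif direction == '<':
--         new_row, new_col = row, col-1
--
--
--     if board[new_row][new_col] == '#':
--         return False
--     elif board[new_row][new_col] == 'O':
--         preceding.append((new_row, new_col))
--         return can_move_1(board, new_row, new_col, direction, preceding)
--     elif board[new_row][new_col] == '.':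
--         preceding.append((new_row, new_col))
--         return True
-- ===== SOURCE B (Python) =====
-- def can_move_1(board, row, col, direction, preceding):
--     dr, dc = {'^': (-1, 0), '>': (0, 1), 'v': (1, 0), '<': (0, -1)}[direction]
--     # Materialise the ray of cells ahead of (row, col) up to (and including)
--     # the first non-'O' cell, then decide from the last cell alone.
--     ray = []
--     r, c = row, col
--     while True:
--         r += dr
--         c += dc
--         cell = board[r][c]
--         ray.append(((r, c), cell))
--         if cell != 'O':
--             break
--     preceding.extend(pos for pos, _ in ray[:-1])  # the run of 'O' cells
--     last_pos, last_cell = ray[-1]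
--     if last_cell == '#':
--         return False
--     if last_cell == '.':
--         preceding.append(last_pos)
--         return True
--     return None
-- ===== Notes on version B (the rewrite author's own statement) =====
-- stated objective: alternative
-- what changed: Replaces A's tail recursion (branching and appending at every step) by a dict-driven offset lookup plus an explicit loop that first materialises the ray of cells up to the first non-'O' cell and then decides the result from the last cell alone, extending preceding in one batch.
import Mathlib
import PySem

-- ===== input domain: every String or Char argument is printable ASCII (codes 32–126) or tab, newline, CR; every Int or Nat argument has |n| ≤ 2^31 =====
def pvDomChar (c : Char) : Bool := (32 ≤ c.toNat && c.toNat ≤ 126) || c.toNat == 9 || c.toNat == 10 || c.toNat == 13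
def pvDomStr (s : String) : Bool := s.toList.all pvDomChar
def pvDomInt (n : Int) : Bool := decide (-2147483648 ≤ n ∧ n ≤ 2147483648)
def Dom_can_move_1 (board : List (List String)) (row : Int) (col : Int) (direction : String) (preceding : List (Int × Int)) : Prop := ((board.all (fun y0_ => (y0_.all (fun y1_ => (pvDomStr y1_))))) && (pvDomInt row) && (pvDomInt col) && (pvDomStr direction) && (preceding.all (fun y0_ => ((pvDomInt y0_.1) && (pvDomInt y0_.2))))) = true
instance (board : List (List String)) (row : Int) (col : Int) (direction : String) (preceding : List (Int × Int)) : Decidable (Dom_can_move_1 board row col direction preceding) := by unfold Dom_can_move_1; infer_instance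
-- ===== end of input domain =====

-- B replaces A's tail recursion by a dict-driven offset lookup plus an explicit loop that
-- materialises the ray of cells up to the first non-'O' cell and decides from its last cell
-- (same return value and same in-place appends to `preceding` on every input admitted by Pre_;
-- the ports model the return value only, `preceding` mutation is a Python-side effect).


-- shared primitive: board[r][c] (Python indexing, negative wrap; none = IndexError)
def pvCellAt (board : List (List String)) (r c : Int) : Option String :=
  (PySem.List.pyGet? board r).bind (fun rw => PySem.List.pyGet? rw c)

-- totality guard only: an upper bound on the number of in-range steps any push line can take
def pvFuel (board : List (List String)) : Nat :=
  2 * board.length + 2 * ((board.map List.length).foldl max 0) + 2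

-- ===== PORT A =====
-- A's tail recursion, step for step; fuel is a totality guard (never exhausted on Pre_ inputs)
def goA (board : List (List String)) (dr dc : Int) : Nat → Int → Int → Option Bool
  | 0, _, _ => none
  | fuel+1, r, c =>
    match pvCellAt board (r + dr) (c + dc) with
    | none => none   -- IndexError in Python; outside Pre_
    | some cell =>
      if cell = "#" then some false
      else if cell = "O" then goA board dr dc fuel (r + dr) (c + dc)
      else if cell = "." then some true
      else none      -- Python falls through and returns None

def can_move_1 (board : List (List String)) (row : Int) (col : Int) (direction : String) (preceding : List (Int × Int)) : Option Bool :=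
  if direction = "^" then goA board (-1) 0 (pvFuel board) row col
  else if direction = ">" then goA board 0 1 (pvFuel board) row col
  else if direction = "v" then goA board 1 0 (pvFuel board) row col
  else if direction = "<" then goA board 0 (-1) (pvFuel board) row col
  else none          -- NameError in Python; outside Pre_

-- ===== PORT B =====
def pvDirTab : PySem.Dict String (Int × Int) :=
  PySem.Dict.ofList [("^", (-1, 0)), (">", (0, 1)), ("v", (1, 0)), ("<", (0, -1))]

-- B's while loop: collect the ray of cells up to and including the first non-'O' cell
def rayB (board : List (List String)) (dr dc : Int) : Nat → Int → Int → Option (List String)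
  | 0, _, _ => none
  | fuel+1, r, c =>
    match pvCellAt board r c with
    | none => none   -- IndexError in Python; outside Pre_
    | some cell =>
      if cell = "O" then (rayB board dr dc fuel (r + dr) (c + dc)).map (cell :: ·)
      else some [cell]

-- B's decision from the last cell of the ray
def verdictB (cells : List String) : Option Bool :=
  match cells.getLast? with
  | none => none
  | some cell => if cell = "#" then some false else if cell = "." then some true else none

def can_move_1_alt (board : List (List String)) (row : Int) (col : Int) (direction : String) (preceding : List (Int × Int)) : Option Bool :=
  match pvDirTab.get? direction with
  | none => none     -- KeyError in Python; outside Pre_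
  | some (dr, dc) =>
    match rayB board dr dc (pvFuel board) (row + dr) (col + dc) with
    | none => none
    | some cells => verdictB cells

-- ===== PRECONDITION & SPEC =====
-- Pre_ admits exactly the inputs on which Python A returns: a valid arrow direction, and every
-- lookup the walk performs (each one reached only through a prefix of in-range 'O' cells) in range.
def pvWalkOk (board : List (List String)) (row col dr dc : Int) : Prop :=
  ∀ k ∈ List.range (pvFuel board),
    (∀ j ∈ List.range k, pvCellAt board (row + (j + 1) * dr) (col + (j + 1) * dc) = some "O") →
    (pvCellAt board (row + (k + 1) * dr) (col + (k + 1) * dc)).isSome = true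

def Pre_can_move_1 (board : List (List String)) (row : Int) (col : Int) (direction : String) (preceding : List (Int × Int)) : Prop :=
  (direction = "^" ∧ pvWalkOk board row col (-1) 0) ∨
  (direction = ">" ∧ pvWalkOk board row col 0 1) ∨
  (direction = "v" ∧ pvWalkOk board row col 1 0) ∨
  (direction = "<" ∧ pvWalkOk board row col 0 (-1))

instance (board : List (List String)) (row : Int) (col : Int) (direction : String) (preceding : List (Int × Int)) : Decidable (Pre_can_move_1 board row col direction preceding) := by
  unfold Pre_can_move_1 pvWalkOk; infer_instance

def pvWitness_can_move_1 : List (List String) × Int × Int × String × (List (Int × Int)) :=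
  ([["O", "O", "."]], 0, 0, ">", [])

def Spec_can_move_1 (board : List (List String)) (row : Int) (col : Int) (direction : String) (preceding : List (Int × Int)) (out : Option Bool) : Prop := out = can_move_1_alt board row col direction preceding
instance (board : List (List String)) (row : Int) (col : Int) (direction : String) (preceding : List (Int × Int)) (out : Option Bool) : Decidable (Spec_can_move_1 board row col direction preceding out) := by unfold Spec_can_move_1; infer_instance

-- ===== CLAIM (what is proved, stated in full; the proofs are below) =====
def Claim_equal_can_move_1 : Prop := ∀ (board : List (List String)) (row : Int) (col : Int) (direction : String) (preceding : List (Int × Int)), Dom_can_move_1 board row col direction preceding → Pre_can_move_1 board row col direction preceding → Spec_can_move_1 board row col direction preceding (can_move_1 board row col direction preceding)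

-- ===== LEMMAS AND PROOFS =====
lemma rayB_ne_nil (board : List (List String)) (dr dc : Int) :
    ∀ (fuel : Nat) (r c : Int) (l : List String), rayB board dr dc fuel r c = some l → l ≠ [] := by
  intro fuel r c l h
  cases fuel with
  | zero => simp [rayB] at h
  | succ n =>
    rw [rayB] at h
    cases hc : pvCellAt board r c with
    | none => rw [hc] at h; simp at h
    | some cell =>
      rw [hc] at h
      by_cases ho : cell = "O"
      · simp [ho] at h
        obtain ⟨l', -, rfl⟩ := h
        simp
      · simp [ho] at h
        subst h
        simp

lemma goA_eq_rayB (board : List (List String)) (dr dc : Int) :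
    ∀ (fuel : Nat) (r c : Int),
      goA board dr dc fuel r c = (rayB board dr dc fuel (r + dr) (c + dc)).elim none verdictB := by
  intro fuel
  induction fuel with
  | zero => intro r c; simp [goA, rayB]
  | succ n ih =>
    intro r c
    rw [goA, rayB]
    cases hc : pvCellAt board (r + dr) (c + dc) with
    | none => simp
    | some cell =>
      by_cases h1 : cell = "#"
      · simp [h1, verdictB]
      · by_cases h2 : cell = "O"
        · subst h2
          simp only [h1, if_false, if_true]
          rw [ih (r + dr) (c + dc)]
          cases hr : rayB board dr dc n (r + dr + dr) (c + dc + dc) with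
          | none => simp
          | some l =>
            have hne : l ≠ [] := rayB_ne_nil board dr dc n _ _ l hr
            cases l with
            | nil => exact absurd rfl hne
            | cons x xs => simp [verdictB, List.getLast?_cons_cons]
        · by_cases h3 : cell = "."
          · simp [h1, h2, h3, verdictB]
          · simp [h1, h2, h3, verdictB]

lemma dirTab_get? (d : String) :
    pvDirTab.get? d =
      if d = "^" then some ((-1 : Int), (0 : Int))
      else if d = ">" then some (0, 1)
      else if d = "v" then some (1, 0)
      else if d = "<" then some (0, -1)
      else none := by
  simp only [pvDirTab, PySem.Dict.ofList, PySem.Dict.update, PySem.Dict.get?_insert,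
    PySem.Dict.get?_empty, List.foldl]
  split_ifs <;> simp_all

lemma ports_agree (board : List (List String)) (row col : Int) (direction : String)
    (preceding : List (Int × Int)) :
    can_move_1 board row col direction preceding = can_move_1_alt board row col direction preceding := by
  unfold can_move_1 can_move_1_alt
  rw [dirTab_get?]
  by_cases h1 : direction = "^" <;> by_cases h2 : direction = ">" <;>
    by_cases h3 : direction = "v" <;> by_cases h4 : direction = "<" <;>
    simp [h1, h2, h3, h4, goA_eq_rayB] <;>
    cases hr : rayB board _ _ (pvFuel board) _ _ <;> simp

-- ===== VERDICT (by name: the statement is the Claim_ definition above) =====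
theorem can_move_1_spec : Claim_equal_can_move_1 := by
  intro board row col direction preceding _ _
  unfold Spec_can_move_1
  exact ports_agree board row col direction preceding
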